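-- pv_equiv track=rewrite | github.com/MustofAhmed41/RSA-algorithm | RSA_python.py | convertToCipher
-- ===== SOURCE A (Python) =====
-- def convertCharToInteger(a):
--     b = ord(a)
--     if 97 <= b <= 122:
--         return b - 69
--     elif 65 <= b <= 90:
--         return b - 64
--     elif b == 32:
--         return 27
--
-- def convertToCipher(input):
--     val = 0
--     counter = 1
--     counter2 = 1
--     original = input
--     ret = 0
--     for element in range(len(original)-1, -1, -1):
--         ch = convertCharToInteger(original[element])
--         if ch <= 9:
--             ret += 1*counter2
--             ch *= counter
--             counter *= 10
--         else:
--             ret += 2 * counter2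
--             ch *= counter
--             counter *= 100
--         counter2 *= 10
--         val += ch
--     return val, ret
-- ===== SOURCE B (Python) =====
-- def convertCharToInteger(a):
--     b = ord(a)
--     if 97 <= b <= 122:
--         return b - 69
--     elif 65 <= b <= 90:
--         return b - 64
--     elif b == 32:
--         return 27
--
-- def convertToCipher(input):
--     # Single forward pass, Horner-style accumulation: no index arithmetic,
--     # no reversal, no counter/counter2 positional multipliers.
--     val = 0
--     ret = 0
--     for ch in input:
--         code = convertCharToInteger(ch)
--         if code <= 9:
--             val = val * 10 + code
--             ret = ret * 10 + 1
--         else: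
--             val = val * 100 + code
--             ret = ret * 10 + 2
--     return val, ret
-- ===== Notes on version B (the rewrite author's own statement) =====
-- stated objective: simpler
-- what changed: Replaces the backward index loop that assembles both numbers positionally with three running multipliers (counter, counter2) by a single forward Horner-style pass that keeps only the two accumulators (val = val*10**w + code, ret = ret*10 + w).
-- outside the precondition, e.g. on convertToCipher('a1'): A raises TypeError, B raises TypeError
import Mathlib
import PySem

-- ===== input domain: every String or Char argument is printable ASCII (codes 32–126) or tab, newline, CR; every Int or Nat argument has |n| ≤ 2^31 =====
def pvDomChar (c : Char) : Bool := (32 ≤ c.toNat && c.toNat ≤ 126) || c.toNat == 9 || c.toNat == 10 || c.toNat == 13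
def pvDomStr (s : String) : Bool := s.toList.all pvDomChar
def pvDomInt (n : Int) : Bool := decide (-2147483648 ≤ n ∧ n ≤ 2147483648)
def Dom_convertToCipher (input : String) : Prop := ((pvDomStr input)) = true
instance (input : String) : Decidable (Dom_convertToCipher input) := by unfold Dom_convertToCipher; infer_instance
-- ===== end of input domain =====

-- B replaces A's backward positional accumulation (three multipliers) by a forward Horner pass with two accumulators; equal results proved on letter/space inputs (elsewhere Python raises TypeError).

-- ===== PORT A =====
def convertCharToInteger (a : Char) : Option Int :=
  let b : Int := (a.toNat : Int)
  if 97 ≤ b ∧ b ≤ 122 then some (b - 69)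
  else if 65 ≤ b ∧ b ≤ 90 then some (b - 64)
  else if b = 32 then some 27
  else none  -- Python falls off the end: returns None

def convertToCipher (input : String) : Int × Int :=
  let original := input.toList
  let st := (PySem.List.pyRange ((original.length : Int) - 1) (-1) (-1)).foldl
    (fun (s : Int × Int × Int × Int) element =>
      -- s = (val, counter, counter2, ret)
      -- if convertCharToInteger returns None, Python raises TypeError comparing None with 9;
      -- those inputs are outside Pre_, the '.getD 0' value is never claimed about
      let ch := (convertCharToInteger (PySem.List.pyGetD original element ' ')).getD 0
      if ch ≤ 9 then
        (s.1 + ch * s.2.1, s.2.1 * 10, s.2.2.1 * 10, s.2.2.2 + 1 * s.2.2.1)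
      else
        (s.1 + ch * s.2.1, s.2.1 * 100, s.2.2.1 * 10, s.2.2.2 + 2 * s.2.2.1))
    (0, 1, 1, 0)
  (st.1, st.2.2.2)

-- ===== PORT B =====
def convertToCipher_alt (input : String) : Int × Int :=
  input.toList.foldl
    (fun (s : Int × Int) ch =>
      -- a None from convertCharToInteger makes Python B raise TypeError too; excluded by Pre_
      let code := (convertCharToInteger ch).getD 0
      if code ≤ 9 then (s.1 * 10 + code, s.2 * 10 + 1)
      else (s.1 * 100 + code, s.2 * 10 + 2))
    (0, 0)

-- ===== PRECONDITION & SPEC =====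
-- Pre_ excludes exactly the inputs containing a character that is not an ASCII letter or space:
-- there convertCharToInteger returns None and both Pythons raise TypeError comparing None with 9.
def Pre_convertToCipher (input : String) : Prop :=
  (input.toList.all fun c =>
    decide ((97 ≤ c.toNat ∧ c.toNat ≤ 122) ∨ (65 ≤ c.toNat ∧ c.toNat ≤ 90) ∨ c.toNat = 32)) = true
instance (input : String) : Decidable (Pre_convertToCipher input) := by unfold Pre_convertToCipher; infer_instance
def pvWitness_convertToCipher : String := "Hi"

def Spec_convertToCipher (input : String) (out : Int × Int) : Prop := out = convertToCipher_alt input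
instance (input : String) (out : Int × Int) : Decidable (Spec_convertToCipher input out) := by unfold Spec_convertToCipher; infer_instance

-- ===== CLAIM (what is proved, stated in full; the proofs are below) =====
def Claim_equal_convertToCipher : Prop := ∀ (input : String), Dom_convertToCipher input → Pre_convertToCipher input → Spec_convertToCipher input (convertToCipher input)

-- ===== LEMMAS AND PROOFS =====

-- named copies of the two loop bodies (definitionally equal to the inline lambdas in the ports)
def pvSA (s : Int × Int × Int × Int) (c : Char) : Int × Int × Int × Int :=
  let ch := (convertCharToInteger c).getD 0
  if ch ≤ 9 then
    (s.1 + ch * s.2.1, s.2.1 * 10, s.2.2.1 * 10, s.2.2.2 + 1 * s.2.2.1)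
  else
    (s.1 + ch * s.2.1, s.2.1 * 100, s.2.2.1 * 10, s.2.2.2 + 2 * s.2.2.1)

def pvSB (s : Int × Int) (c : Char) : Int × Int :=
  let code := (convertCharToInteger c).getD 0
  if code ≤ 9 then (s.1 * 10 + code, s.2 * 10 + 1)
  else (s.1 * 100 + code, s.2 * 10 + 2)

-- digit width contributed by one character
def pvW (c : Char) : Nat := if (convertCharToInteger c).getD 0 ≤ 9 then 1 else 2
def pvWsum (l : List Char) : Nat := (l.map pvW).sum

-- B's fold from a general initial state
lemma pvB_init (l : List Char) (v r : Int) :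
    l.foldl pvSB (v, r) =
      (v * 10 ^ pvWsum l + (l.foldl pvSB (0, 0)).1,
       r * 10 ^ l.length + (l.foldl pvSB (0, 0)).2) := by
  induction l generalizing v r with
  | nil => simp [pvWsum]
  | cons c t ih =>
    simp only [List.foldl_cons, pvSB, pvWsum, List.map_cons, List.sum_cons, List.length_cons, pvW]
    split_ifs with h
    · rw [ih (v * 10 + _), ih (0 * 10 + _)]
      simp only [Prod.mk.injEq, pvWsum]
      constructor <;> ring
    · rw [ih (v * 100 + _), ih (0 * 100 + _)]
      simp only [Prod.mk.injEq, pvWsum]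
      constructor <;> ring

lemma pvB_cons (c : Char) (t : List Char) :
    (c :: t).foldl pvSB (0, 0) =
      (((convertCharToInteger c).getD 0) * 10 ^ pvWsum t + (t.foldl pvSB (0, 0)).1,
       (if (convertCharToInteger c).getD 0 ≤ 9 then (1 : Int) else 2) * 10 ^ t.length
         + (t.foldl pvSB (0, 0)).2) := by
  simp only [List.foldl_cons, pvSB]
  split_ifs with h <;> · rw [pvB_init] ; norm_num

-- A's reversed fold computes B's two accumulators plus the two counters
lemma pvA_rev (l : List Char) :
    l.reverse.foldl pvSA (0, 1, 1, 0) =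
      ((l.foldl pvSB (0, 0)).1, 10 ^ pvWsum l, 10 ^ l.length, (l.foldl pvSB (0, 0)).2) := by
  induction l with
  | nil => simp [pvWsum]
  | cons c t ih =>
    rw [List.reverse_cons, List.foldl_append, ih, pvB_cons]
    simp only [List.foldl_cons, List.foldl_nil, pvSA, pvWsum, List.map_cons,
      List.sum_cons, List.length_cons, pvW]
    split_ifs with h <;>
      · simp only [Prod.mk.injEq]
        refine ⟨by ring, by ring, by ring, by ring⟩

-- ===== VERDICT (by name: the statement is the Claim_ definition above) =====
theorem convertToCipher_spec : Claim_equal_convertToCipher := by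
  intro input _ _
  show convertToCipher input = convertToCipher_alt input
  unfold convertToCipher convertToCipher_alt
  set l := input.toList with hl
  have h1 : PySem.List.pyRange ((l.length : Int) - 1) (-1) (-1)
      = (PySem.List.pyRange 0 (l.length : Int)).reverse := by
    have := PySem.List.pyRange_neg_one_eq_reverse ((l.length : Int) - 1) (-1)
    simpa using this
  have h2 : (PySem.List.pyRange 0 (l.length : Int)).map
      (fun j => PySem.List.pyGetD l j ' ') = l := by
    have := PySem.List.map_pyGetD_pyRange l ' ' (a := 0) (by norm_num)
    simpa [PySem.List.len] using this
  calc ((PySem.List.pyRange ((l.length : Int) - 1) (-1) (-1)).foldl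
          (fun s element => pvSA s (PySem.List.pyGetD l element ' ')) (0, 1, 1, 0)
        |>.1,
        (PySem.List.pyRange ((l.length : Int) - 1) (-1) (-1)).foldl
          (fun s element => pvSA s (PySem.List.pyGetD l element ' ')) (0, 1, 1, 0)
        |>.2.2.2)
      = (l.reverse.foldl pvSA (0, 1, 1, 0) |>.1,
         l.reverse.foldl pvSA (0, 1, 1, 0) |>.2.2.2) := by
        rw [h1, ← List.foldl_map, List.map_reverse, h2]
    _ = l.foldl pvSB (0, 0) := by rw [pvA_rev]
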